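-- pv_equiv track=rewrite | github.com/vidhidutta/Ankigenerator | providers/medical_vision_provider.py | _is_part_of_medical_concept
-- ===== SOURCE A (Python) =====
-- def _is_part_of_medical_concept(prev_text: str, current_text: str) -> bool:
--     """Check if two texts are part of the same medical concept"""
--     prev_lower = prev_text.lower()
--     current_lower = current_text.lower()
--
--     # Check for enzyme name patterns
--     if any(word in prev_lower for word in ['glucose', 'fructose', 'galactose', 'mannose']):
--         if any(word in current_lower for word in ['dehydrogenase', 'isomerase', 'kinase', 'phosphatase', 'phosphate']):
--             return True
--
--     # Check for anatomical patterns
--     if any(word in prev_lower for word in ['left', 'right', 'anterior', 'posterior', 'superior', 'inferior']):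
--         if any(word in current_lower for word in ['artery', 'vein', 'nerve', 'muscle', 'bone']):
--             return True
--
--     # Check for compound patterns
--     if any(word in prev_lower for word in ['adenosine', 'guanosine', 'cytidine', 'uridine']):
--         if any(word in current_lower for word in ['phosphate', 'triphosphate', 'diphosphate']):
--             return True
--
--     return False
-- ===== SOURCE B (Python) =====
-- # Keyword -> category-bitmask lexicon; a text's categories are a bitset, and the
-- # two texts match iff their prev/current category bitsets intersect.
-- _PREV_MASK = {
--     'glucose': 1, 'fructose': 1, 'galactose': 1, 'mannose': 1,
--     'left': 2, 'right': 2, 'anterior': 2, 'posterior': 2, 'superior': 2, 'inferior': 2,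
--     'adenosine': 4, 'guanosine': 4, 'cytidine': 4, 'uridine': 4,
-- }
-- _CUR_MASK = {
--     'dehydrogenase': 1, 'isomerase': 1, 'kinase': 1, 'phosphatase': 1,
--     'phosphate': 5,          # phosphate closes both the enzyme and the nucleotide category
--     'artery': 2, 'vein': 2, 'nerve': 2, 'muscle': 2, 'bone': 2,
--     'triphosphate': 4, 'diphosphate': 4,
-- }
--
--
-- def _categories(text, lexicon):
--     m = 0
--     for word, bits in lexicon.items():
--         if word in text:
--             m |= bits
--     return m
--
--
-- def _is_part_of_medical_concept(prev_text: str, current_text: str) -> bool: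
--     """Check if two texts are part of the same medical concept"""
--     pm = _categories(prev_text.lower(), _PREV_MASK)
--     return bool(pm) and bool(pm & _categories(current_text.lower(), _CUR_MASK))
-- ===== Notes on version B (the rewrite author's own statement) =====
-- stated objective: alternative
-- what changed: Replaces the three sequential rule checks with nested any() by a flat keyword-to-bitmask lexicon: one pass per text computes its category bitset (with 'phosphate' merged into a single entry carrying two bits), and the answer is whether the two bitsets intersect, skipping the current-text scan entirely when the prev bitset is empty.
import Mathlib
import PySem

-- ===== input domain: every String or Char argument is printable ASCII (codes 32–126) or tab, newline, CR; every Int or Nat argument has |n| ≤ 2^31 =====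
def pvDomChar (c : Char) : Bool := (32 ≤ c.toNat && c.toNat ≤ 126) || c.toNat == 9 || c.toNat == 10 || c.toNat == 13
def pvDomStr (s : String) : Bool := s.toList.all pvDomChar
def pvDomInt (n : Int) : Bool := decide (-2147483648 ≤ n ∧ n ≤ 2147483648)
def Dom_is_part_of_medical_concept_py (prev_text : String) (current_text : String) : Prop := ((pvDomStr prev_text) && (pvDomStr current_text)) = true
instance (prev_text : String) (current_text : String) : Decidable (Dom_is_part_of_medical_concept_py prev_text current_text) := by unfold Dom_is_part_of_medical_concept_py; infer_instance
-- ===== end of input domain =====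

-- B replaces A's three sequential rule checks by a flat keyword→bitmask lexicon: one pass
-- per text builds its category bitset, and the result is whether the two bitsets intersect
-- (alternative decomposition; same cost).

-- ===== PORT A =====
def is_part_of_medical_concept_py (prev_text : String) (current_text : String) : Bool :=
  let prev_lower := PySem.Str.lower prev_text
  let current_lower := PySem.Str.lower current_text
  if (["glucose", "fructose", "galactose", "mannose"].any fun w => PySem.Str.isIn w prev_lower) &&
     (["dehydrogenase", "isomerase", "kinase", "phosphatase", "phosphate"].any fun w => PySem.Str.isIn w current_lower) then
    true
  else if (["left", "right", "anterior", "posterior", "superior", "inferior"].any fun w => PySem.Str.isIn w prev_lower) &&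
          (["artery", "vein", "nerve", "muscle", "bone"].any fun w => PySem.Str.isIn w current_lower) then
    true
  else if (["adenosine", "guanosine", "cytidine", "uridine"].any fun w => PySem.Str.isIn w prev_lower) &&
          (["phosphate", "triphosphate", "diphosphate"].any fun w => PySem.Str.isIn w current_lower) then
    true
  else
    false

-- ===== PORT B =====
def pvPrevMask : List (String × Nat) :=
  [("glucose", 1), ("fructose", 1), ("galactose", 1), ("mannose", 1),
   ("left", 2), ("right", 2), ("anterior", 2), ("posterior", 2), ("superior", 2), ("inferior", 2),
   ("adenosine", 4), ("guanosine", 4), ("cytidine", 4), ("uridine", 4)]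

def pvCurMask : List (String × Nat) :=
  [("dehydrogenase", 1), ("isomerase", 1), ("kinase", 1), ("phosphatase", 1),
   ("phosphate", 5),
   ("artery", 2), ("vein", 2), ("nerve", 2), ("muscle", 2), ("bone", 2),
   ("triphosphate", 4), ("diphosphate", 4)]

def pvCategories (text : String) (lexicon : List (String × Nat)) : Nat :=
  lexicon.foldl (fun m p => if PySem.Str.isIn p.1 text then m ||| p.2 else m) 0

def is_part_of_medical_concept_py_alt (prev_text : String) (current_text : String) : Bool :=
  let pm := pvCategories (PySem.Str.lower prev_text) pvPrevMask
  decide (pm ≠ 0) && decide (pm &&& pvCategories (PySem.Str.lower current_text) pvCurMask ≠ 0)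

-- ===== PRECONDITION & SPEC =====
def Spec_is_part_of_medical_concept_py (prev_text : String) (current_text : String) (out : Bool) : Prop := out = is_part_of_medical_concept_py_alt prev_text current_text
instance (prev_text : String) (current_text : String) (out : Bool) : Decidable (Spec_is_part_of_medical_concept_py prev_text current_text out) := by unfold Spec_is_part_of_medical_concept_py; infer_instance

-- ===== CLAIM (what is proved, stated in full; the proofs are below) =====
def Claim_equal_is_part_of_medical_concept_py : Prop := ∀ (prev_text : String) (current_text : String), Dom_is_part_of_medical_concept_py prev_text current_text → Spec_is_part_of_medical_concept_py prev_text current_text (is_part_of_medical_concept_py prev_text current_text)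

-- ===== LEMMAS AND PROOFS =====

-- the mask fold factors through ||| of the tail fold
theorem pvFold_or (t : String) (l : List (String × Nat)) (acc : Nat) :
    l.foldl (fun m p => if PySem.Str.isIn p.1 t then m ||| p.2 else m) acc
      = acc ||| l.foldl (fun m p => if PySem.Str.isIn p.1 t then m ||| p.2 else m) 0 := by
  induction l generalizing acc with
  | nil => simp
  | cons h tl ih =>
    simp only [List.foldl_cons]
    rw [ih, ih (if PySem.Str.isIn h.1 t then 0 ||| h.2 else 0)]
    split_ifs <;> simp [Nat.or_assoc]

theorem pvCat_cons (t w : String) (m : Nat) (l : List (String × Nat)) :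
    pvCategories t ((w, m) :: l)
      = (if PySem.Str.isIn w t then m else 0) ||| pvCategories t l := by
  unfold pvCategories
  simp only [List.foldl_cons]
  rw [pvFold_or]
  split_ifs <;> simp

theorem pvCat_nil (t : String) : pvCategories t [] = 0 := rfl

-- prev bitset = one bit per matched rule group
theorem pvPrev_eq (t : String) :
    pvCategories t pvPrevMask
      = (if ["glucose", "fructose", "galactose", "mannose"].any (fun w => PySem.Str.isIn w t) then 1 else 0) |||
        ((if ["left", "right", "anterior", "posterior", "superior", "inferior"].any (fun w => PySem.Str.isIn w t) then 2 else 0) |||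
         (if ["adenosine", "guanosine", "cytidine", "uridine"].any (fun w => PySem.Str.isIn w t) then 4 else 0)) := by
  simp only [pvPrevMask, pvCat_cons, pvCat_nil, List.any_cons, List.any_nil, Bool.or_false]
  generalize PySem.Str.isIn "glucose" t = b1
  generalize PySem.Str.isIn "fructose" t = b2
  generalize PySem.Str.isIn "galactose" t = b3
  generalize PySem.Str.isIn "mannose" t = b4
  generalize PySem.Str.isIn "left" t = b5
  generalize PySem.Str.isIn "right" t = b6
  generalize PySem.Str.isIn "anterior" t = b7
  generalize PySem.Str.isIn "posterior" t = b8
  generalize PySem.Str.isIn "superior" t = b9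
  generalize PySem.Str.isIn "inferior" t = b10
  generalize PySem.Str.isIn "adenosine" t = b11
  generalize PySem.Str.isIn "guanosine" t = b12
  generalize PySem.Str.isIn "cytidine" t = b13
  generalize PySem.Str.isIn "uridine" t = b14
  revert b1 b2 b3 b4 b5 b6 b7 b8 b9 b10 b11 b12 b13 b14
  decide

-- current bitset = one bit per matched rule group ('phosphate' contributes bits 1 and 4)
theorem pvCur_eq (t : String) :
    pvCategories t pvCurMask
      = (if ["dehydrogenase", "isomerase", "kinase", "phosphatase", "phosphate"].any (fun w => PySem.Str.isIn w t) then 1 else 0) |||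
        ((if ["artery", "vein", "nerve", "muscle", "bone"].any (fun w => PySem.Str.isIn w t) then 2 else 0) |||
         (if ["phosphate", "triphosphate", "diphosphate"].any (fun w => PySem.Str.isIn w t) then 4 else 0)) := by
  simp only [pvCurMask, pvCat_cons, pvCat_nil, List.any_cons, List.any_nil, Bool.or_false]
  generalize PySem.Str.isIn "dehydrogenase" t = b1
  generalize PySem.Str.isIn "isomerase" t = b2
  generalize PySem.Str.isIn "kinase" t = b3
  generalize PySem.Str.isIn "phosphatase" t = b4
  generalize PySem.Str.isIn "phosphate" t = b5
  generalize PySem.Str.isIn "artery" t = b6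
  generalize PySem.Str.isIn "vein" t = b7
  generalize PySem.Str.isIn "nerve" t = b8
  generalize PySem.Str.isIn "muscle" t = b9
  generalize PySem.Str.isIn "bone" t = b10
  generalize PySem.Str.isIn "triphosphate" t = b11
  generalize PySem.Str.isIn "diphosphate" t = b12
  revert b1 b2 b3 b4 b5 b6 b7 b8 b9 b10 b11 b12
  decide

-- ===== VERDICT (by name: the statement is the Claim_ definition above) =====
theorem is_part_of_medical_concept_py_spec : Claim_equal_is_part_of_medical_concept_py := by
  intro prev_text current_text _
  unfold Spec_is_part_of_medical_concept_py is_part_of_medical_concept_py is_part_of_medical_concept_py_alt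
  simp only []
  rw [pvPrev_eq, pvCur_eq]
  generalize (["glucose", "fructose", "galactose", "mannose"].any fun w => PySem.Str.isIn w (PySem.Str.lower prev_text)) = a1
  generalize (["left", "right", "anterior", "posterior", "superior", "inferior"].any fun w => PySem.Str.isIn w (PySem.Str.lower prev_text)) = a2
  generalize (["adenosine", "guanosine", "cytidine", "uridine"].any fun w => PySem.Str.isIn w (PySem.Str.lower prev_text)) = a3
  generalize (["dehydrogenase", "isomerase", "kinase", "phosphatase", "phosphate"].any fun w => PySem.Str.isIn w (PySem.Str.lower current_text)) = c1
  generalize (["artery", "vein", "nerve", "muscle", "bone"].any fun w => PySem.Str.isIn w (PySem.Str.lower current_text)) = c2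
  generalize (["phosphate", "triphosphate", "diphosphate"].any fun w => PySem.Str.isIn w (PySem.Str.lower current_text)) = c3
  revert a1 a2 a3 c1 c2 c3
  decide
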